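-- pv_equiv track=rewrite | github.com/ShanHuang08/Python-repository | CodeWars/CodeWars1116.py | high_and_low5
-- ===== SOURCE A (Python) =====
-- def high_and_low5(numbers):
--     numbers = numbers.split()
--
--     min = max = int(numbers[0])
--
--     for x in numbers:
--         x = int(x)
--         if x > max:
--             max = x
--         elif x < min:
--             min = x
--
--
--     return ' '.join([str(x) for x in (max, min)])
-- ===== SOURCE B (Python) =====
-- def high_and_low5(numbers):
--     nums = sorted(int(x) for x in numbers.split())
--     return f"{nums[-1]} {nums[0]}"
-- ===== Notes on version B (the rewrite author's own statement) =====
-- stated objective: alternative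
-- what changed: Replaces the single-pass running min/max loop by sorting the parsed numbers once and reading the extremes off the sorted list's endpoints.
import Mathlib
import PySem

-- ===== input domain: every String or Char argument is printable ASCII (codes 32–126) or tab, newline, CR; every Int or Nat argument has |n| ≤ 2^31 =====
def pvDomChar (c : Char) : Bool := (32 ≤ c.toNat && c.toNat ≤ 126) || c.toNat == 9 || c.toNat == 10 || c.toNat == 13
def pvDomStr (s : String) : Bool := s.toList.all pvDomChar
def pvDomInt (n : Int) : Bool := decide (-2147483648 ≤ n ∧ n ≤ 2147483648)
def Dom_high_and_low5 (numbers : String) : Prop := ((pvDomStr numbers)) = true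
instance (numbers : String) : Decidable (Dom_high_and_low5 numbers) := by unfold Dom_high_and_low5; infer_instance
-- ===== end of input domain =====

-- B replaces A's running min/max loop by sorting the parsed numbers and reading the endpoints (alternative decomposition).

-- ===== PORT A =====
-- A's loop step: `x = int(x); if x > max: max = x elif x < min: min = x`, threaded over (min, max);
-- `none` stands for a raised ValueError (excluded by Pre_).
def hal5Step (acc : Option (Int × Int)) (x : String) : Option (Int × Int) :=
  match acc with
  | none => none
  | some (mn, mx) =>
    match PySem.Int.ofStr? x with
    | none => none
    | some xi =>
      if xi > mx then some (mn, xi)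
      else if xi < mn then some (xi, mx)
      else some (mn, mx)

def high_and_low5 (numbers : String) : String :=
  match PySem.List.pyGet? (PySem.Str.split₀ numbers) 0 with
  | none => ""                                  -- IndexError (excluded by Pre_)
  | some t0 =>
    match PySem.Int.ofStr? t0 with
    | none => ""                                -- ValueError (excluded by Pre_)
    | some m0 =>
      match (PySem.Str.split₀ numbers).foldl hal5Step (some (m0, m0)) with
      | none => ""                              -- ValueError (excluded by Pre_)
      | some (mn, mx) =>
        PySem.Str.join " " [PySem.Int.toStr mx, PySem.Int.toStr mn]

-- ===== PORT B =====
def high_and_low5_alt (numbers : String) : String :=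
  match (PySem.Str.split₀ numbers).mapM PySem.Int.ofStr? with
  | none => ""                                  -- ValueError (excluded by Pre_)
  | some vals =>
    match PySem.List.pyGet? (PySem.List.sorted vals (fun x => x) false) (-1),
          PySem.List.pyGet? (PySem.List.sorted vals (fun x => x) false) 0 with
    | some hi, some lo => PySem.Int.toStr hi ++ " " ++ PySem.Int.toStr lo
    | _, _ => ""                                -- IndexError (excluded by Pre_)

-- ===== PRECONDITION & SPEC =====
-- Pre_ excludes exactly the inputs on which A raises: an input with no tokens (IndexError on
-- numbers.split()[0]) or with a token that int() rejects (ValueError).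
def Pre_high_and_low5 (numbers : String) : Prop :=
  PySem.Str.split₀ numbers ≠ [] ∧
  ∀ t ∈ PySem.Str.split₀ numbers, (PySem.Int.ofStr? t).isSome
instance (numbers : String) : Decidable (Pre_high_and_low5 numbers) := by
  unfold Pre_high_and_low5; infer_instance
def pvWitness_high_and_low5 : String := "4 5 29 -3 0"
def Spec_high_and_low5 (numbers : String) (out : String) : Prop := out = high_and_low5_alt numbers
instance (numbers : String) (out : String) : Decidable (Spec_high_and_low5 numbers out) := by unfold Spec_high_and_low5; infer_instance

-- ===== CLAIM (what is proved, stated in full; the proofs are below) =====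
def Claim_equal_high_and_low5 : Prop := ∀ (numbers : String), Dom_high_and_low5 numbers → Pre_high_and_low5 numbers → Spec_high_and_low5 numbers (high_and_low5 numbers)

-- ===== LEMMAS AND PROOFS =====

-- A's step keeps (min, max): given mn ≤ mx, one step is (min mn x, max mx x).
lemma hal5Step_some (mn mx xi : Int) (x : String) (hx : PySem.Int.ofStr? x = some xi)
    (hmm : mn ≤ mx) :
    hal5Step (some (mn, mx)) x = some (min mn xi, max mx xi) := by
  simp only [hal5Step, hx]
  split_ifs with h1 h2 <;> simp [min_def, max_def] <;> omega

-- The whole fold computes the running min and max of the parsed values.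
lemma hal5_fold (toks : List String) (vals : List Int) (mn mx : Int)
    (h : toks.mapM PySem.Int.ofStr? = some vals) (hmm : mn ≤ mx) :
    toks.foldl hal5Step (some (mn, mx)) =
      some (vals.foldl min mn, vals.foldl max mx) := by
  induction toks generalizing vals mn mx with
  | nil => simp_all
  | cons t ts ih =>
    rw [List.mapM_cons] at h
    cases hv : PySem.Int.ofStr? t with
    | none => simp [hv] at h
    | some v =>
      simp only [hv] at h
      cases hvs : ts.mapM PySem.Int.ofStr? with
      | none => simp [hvs] at h
      | some vs =>
        simp only [hvs] at h
        cases h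
        simp only [List.foldl_cons, hal5Step_some mn mx v t hv hmm]
        exact ih vs _ _ hvs (le_trans (min_le_left _ _) (le_trans hmm (le_max_left _ _)))

lemma hal5_map_some (toks : List String)
    (hall : ∀ t ∈ toks, (PySem.Int.ofStr? t).isSome) :
    ∃ vals, toks.mapM PySem.Int.ofStr? = some vals := by
  induction toks with
  | nil => exact ⟨[], rfl⟩
  | cons t ts ih =>
    obtain ⟨v, hv⟩ := Option.isSome_iff_exists.1 (hall t (by simp))
    obtain ⟨vs, hvs⟩ := ih (fun x hx => hall x (by simp [hx]))
    exact ⟨v :: vs, by simp [List.mapM_cons, hv, hvs]⟩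

lemma hal5_min_eq (vals : List Int) (m : Int) (hm : m ∈ vals)
    (hle : ∀ y ∈ vals, m ≤ y) (v0 : Int) (h0 : v0 ∈ vals) :
    vals.foldl min v0 = m := by
  have h1 := PySem.List.foldl_min_le vals v0
  have hub : m ≤ vals.foldl min v0 := by
    rcases PySem.List.foldl_min_mem vals v0 with h | h
    · rw [h]; exact hle v0 h0
    · exact hle _ h
  have hlb : vals.foldl min v0 ≤ m := h1.2 m hm
  omega

lemma hal5_max_eq (vals : List Int) (m : Int) (hm : m ∈ vals)
    (hge : ∀ y ∈ vals, y ≤ m) (v0 : Int) (h0 : v0 ∈ vals) :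
    vals.foldl max v0 = m := by
  have h1 := PySem.List.le_foldl_max vals v0
  have hub : vals.foldl max v0 ≤ m := by
    rcases PySem.List.foldl_max_mem vals v0 with h | h
    · rw [h]; exact hge v0 h0
    · exact hge _ h
  have hlb : m ≤ vals.foldl max v0 := h1.2 m hm
  omega

-- The last element of the sorted list is an upper bound of the list.
lemma sorted_getLast_ge (vals : List Int) (hne : PySem.List.sorted vals (fun x => x) false ≠ [])
    (y : Int) (hy : y ∈ vals) :
    y ≤ (PySem.List.sorted vals (fun x => x) false).getLast hne := by
  have hmem : y ∈ PySem.List.sorted vals (fun x => x) false :=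
    (PySem.List.mem_sorted _ _ _ _).2 hy
  obtain ⟨p, hp, hyp⟩ := List.mem_iff_getElem.1 hmem
  have hlast : (PySem.List.sorted vals (fun x => x) false).getLast hne =
      (PySem.List.sorted vals (fun x => x) false)[(PySem.List.sorted vals (fun x => x) false).length - 1] :=
    List.getLast_eq_getElem hne
  have hmono := PySem.List.sorted_id_getElem_mono (xs := vals) (p := p)
    (q := (PySem.List.sorted vals (fun x => x) false).length - 1)
    (by omega) (by omega)
  rw [hlast, ← hyp]
  simpa using hmono

theorem high_and_low5_spec : Claim_equal_high_and_low5 := by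
  intro numbers _ hpre
  unfold Spec_high_and_low5 high_and_low5 high_and_low5_alt
  obtain ⟨hne, hall⟩ := hpre
  generalize hg : PySem.Str.split₀ numbers = toks at hne hall ⊢
  obtain ⟨vals, hvals⟩ := hal5_map_some toks hall
  obtain ⟨t0, rest, ht0⟩ := List.exists_cons_of_ne_nil hne
  have hget0 : PySem.List.pyGet? toks 0 = some t0 := by
    rw [PySem.List.pyGet?_zero, ht0]; rfl
  obtain ⟨m0, hm0⟩ := Option.isSome_iff_exists.1 (hall t0 (by rw [ht0]; simp))
  have hm0mem : m0 ∈ vals := by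
    rw [ht0, List.mapM_cons, hm0] at hvals
    cases hvs : rest.mapM PySem.Int.ofStr? with
    | none => simp [hvs] at hvals
    | some vs => simp [hvs] at hvals; simp [← hvals]
  simp only [hget0, hm0, hvals, hal5_fold toks vals m0 m0 hvals le_rfl]
  have hvalsne : vals ≠ [] := by intro h; rw [h] at hm0mem; simp at hm0mem
  have hnsne : PySem.List.sorted vals (fun x => x) false ≠ [] := by
    rw [Ne, PySem.List.sorted_eq_nil_iff]; exact hvalsne
  obtain ⟨h0, t, hcons⟩ := List.exists_cons_of_ne_nil hnsne
  have hgetm1 : PySem.List.pyGet? (PySem.List.sorted vals (fun x => x) false) (-1) =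
      some ((PySem.List.sorted vals (fun x => x) false).getLast hnsne) := by
    rw [PySem.List.pyGet?_neg_one, List.getLast?_eq_some_getLast hnsne]
  have hget00 : PySem.List.pyGet? (PySem.List.sorted vals (fun x => x) false) 0 = some h0 := by
    rw [PySem.List.pyGet?_zero, hcons]; rfl
  simp only [hgetm1, hget00]
  have hhead_le : ∀ y ∈ vals, h0 ≤ y := by
    have := PySem.List.key_head_sorted_le (xs := vals) (key := fun x => x) hcons
    simpa using this
  have hhead_mem : h0 ∈ vals := (PySem.List.mem_sorted _ _ _ _).1 (by rw [hcons]; simp)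
  have hlast_mem : (PySem.List.sorted vals (fun x => x) false).getLast hnsne ∈ vals :=
    (PySem.List.mem_sorted _ _ _ _).1 (List.getLast_mem hnsne)
  rw [hal5_min_eq vals h0 hhead_mem hhead_le m0 hm0mem,
      hal5_max_eq vals _ hlast_mem (sorted_getLast_ge vals hnsne) m0 hm0mem]
  -- join " " [a, b] = a ++ " " ++ b
  simp only [PySem.Str.join, PySem.Chars.join, List.intercalate, PySem.Int.toStr]
  simp only [List.map_cons, List.map_nil, String.toList_ofList, List.intersperse,
    List.flatten]
  have hsp : ∀ (b : List Char), String.ofList (' ' :: b) = " " ++ String.ofList b := by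
    intro b
    rw [show (' ' :: b) = [' '] ++ b from rfl, ← String.ofList_append]
  simp [String.ofList_append, hsp, String.append_assoc]
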